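-- pv_equiv track=rewrite | github.com/semacammetu/Hypothesis-driven-experiment-design-with-SEDML-extension | stl_fs_sm-master/stl_fs_sm-master/cause_mining_algo/helper_funs.py | count_formula_components
-- ===== SOURCE A (Python) =====
-- def count_formula_components(prefix_concatenated_formula):
--     """
--     This function is used in one, not very important place. I suspect that it count only the number of | operations that
--     occur in the formula's string form rather than counting how many cause formulas concatanated with | form up this
--     formula. It is not important since its usage is non-essential in the cause mining code, but if it will be used in
--     an important piece of code, it should be rewritten.
--     Args:
--         prefix_concatenated_formula: (string)
--
--     Returns:
--
--     """
--     formula_count = 0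
--     for i in range(len(prefix_concatenated_formula)):
--         if prefix_concatenated_formula[i] == '|':
--             formula_count += 1
--         elif prefix_concatenated_formula[i] == ' ':
--             continue
--         else:
--             break
--     return formula_count
-- ===== SOURCE B (Python) =====
-- def count_formula_components(prefix_concatenated_formula):
--     s = prefix_concatenated_formula
--     rest = s.lstrip('| ')
--     prefix = s[:len(s) - len(rest)]
--     return len(prefix) - prefix.count(' ')
-- ===== Notes on version B (the rewrite author's own statement) =====
-- stated objective: idiomatic
-- what changed: Removes the counting loop entirely: B delimits the leading run of '|'/' ' with str.lstrip and computes the pipe count arithmetically as the prefix length minus its number of spaces, never comparing characters against '|' itself.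
import Mathlib
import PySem

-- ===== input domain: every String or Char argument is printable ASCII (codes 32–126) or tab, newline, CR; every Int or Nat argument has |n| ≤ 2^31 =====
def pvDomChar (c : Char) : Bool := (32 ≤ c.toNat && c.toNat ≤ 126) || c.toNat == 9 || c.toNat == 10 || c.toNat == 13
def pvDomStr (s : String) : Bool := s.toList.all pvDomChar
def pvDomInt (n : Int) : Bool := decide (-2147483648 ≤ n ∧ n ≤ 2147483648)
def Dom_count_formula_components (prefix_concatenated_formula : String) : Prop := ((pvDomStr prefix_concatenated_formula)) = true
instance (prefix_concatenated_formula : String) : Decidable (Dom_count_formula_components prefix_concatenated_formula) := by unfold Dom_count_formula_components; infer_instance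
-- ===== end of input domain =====

-- B removes A's counting loop: it delimits the leading '|'/' ' run with lstrip and obtains
-- the pipe count arithmetically as (prefix length) - (spaces in prefix) (objective: idiomatic).

-- ===== PORT A =====
-- A's for-loop over indices with an accumulator and early break, as structural recursion
-- over the character list with the same branch order.
def countLoopA : List Char → Int → Int
  | [], acc => acc
  | c :: rest, acc =>
    if c = '|' then countLoopA rest (acc + 1)
    else if c = ' ' then countLoopA rest acc
    else acc

def count_formula_components (prefix_concatenated_formula : String) : Int :=
  countLoopA prefix_concatenated_formula.toList 0

-- ===== PORT B =====
-- Source B: rest = s.lstrip('| '); prefix = s[:len(s)-len(rest)]; return len(prefix) - prefix.count(' ')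
def count_formula_components_alt (prefix_concatenated_formula : String) : Int :=
  let l := prefix_concatenated_formula.toList
  let rest := l.dropWhile (fun c => c == '|' || c == ' ')   -- s.lstrip('| ')
  let pre := l.take (l.length - rest.length)                -- s[:len(s)-len(rest)]
  (pre.length : Int) - (pre.count ' ' : Int)

-- ===== PRECONDITION & SPEC =====
def Spec_count_formula_components (prefix_concatenated_formula : String) (out : Int) : Prop := out = count_formula_components_alt prefix_concatenated_formula
instance (prefix_concatenated_formula : String) (out : Int) : Decidable (Spec_count_formula_components prefix_concatenated_formula out) := by unfold Spec_count_formula_components; infer_instance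

-- ===== CLAIM (what is proved, stated in full; the proofs are below) =====
def Claim_equal_count_formula_components : Prop := ∀ (prefix_concatenated_formula : String), Dom_count_formula_components prefix_concatenated_formula → Spec_count_formula_components prefix_concatenated_formula (count_formula_components prefix_concatenated_formula)

-- ===== LEMMAS AND PROOFS =====
theorem countLoopA_eq (l : List Char) (acc : Int) :
    countLoopA l acc = acc + ((l.takeWhile (fun c => c == '|' || c == ' ')).count '|' : Int) := by
  induction l generalizing acc with
  | nil => simp [countLoopA, List.takeWhile]
  | cons c rest ih =>
    by_cases h1 : c = '|'
    · subst h1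
      simp [countLoopA, List.takeWhile, ih]
      ring
    · by_cases h2 : c = ' '
      · subst h2
        simp [countLoopA, List.takeWhile, ih, h1]
      · have hb : (c == '|' || c == ' ') = false := by simp [h1, h2]
        simp [countLoopA, List.takeWhile, h1, h2, hb]

-- B's slice s[:len(s)-len(rest)] is exactly the takeWhile prefix.
theorem take_sub_dropWhile (p : Char → Bool) (l : List Char) :
    l.take (l.length - (l.dropWhile p).length) = l.takeWhile p := by
  have h := List.takeWhile_append_dropWhile (p := p) (l := l)
  have hlen := congrArg List.length h
  simp only [List.length_append] at hlen
  rw [← hlen, Nat.add_sub_cancel]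
  exact (List.prefix_iff_eq_take.mp (List.takeWhile_prefix p)).symm

-- In a list of only '|' and ' ', pipes = length - spaces.
theorem count_pipe_eq (t : List Char) (h : ∀ c ∈ t, c = '|' ∨ c = ' ') :
    (t.count '|' : Int) = (t.length : Int) - (t.count ' ' : Int) := by
  induction t with
  | nil => simp
  | cons c rest ih =>
    have hc := h c (List.mem_cons_self ..)
    have ih' := ih (fun c hc => h c (List.mem_cons_of_mem _ hc))
    rcases hc with hc | hc <;> subst hc <;>
      simp [ih']; omega

-- ===== VERDICT (by name: the statement is the Claim_ definition above) =====
theorem count_formula_components_spec : Claim_equal_count_formula_components := by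
  intro s _
  unfold Spec_count_formula_components count_formula_components count_formula_components_alt
  simp only [countLoopA_eq, take_sub_dropWhile]
  rw [count_pipe_eq]
  · ring
  · intro c hc
    have := List.mem_takeWhile_imp hc
    rcases Bool.or_eq_true_iff.mp this with h | h <;> [left; right] <;> exact beq_iff_eq.mp h
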